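-- pv_equiv track=rewrite | github.com/mahawkma/Python-Crypto-Code | cryptoClasses/cracksub.py | getpatterntuple
-- ===== SOURCE A (Python) =====
-- def getpatterntuple(word):
--     """Takes a string and returns a tuple which retains only character
--     repetition info. Examples:
--     'word'  -> (1, 2, 3, 4)
--     'all'   -> (1, 2, 2)
--     'llama' -> (1, 1, 2, 3, 2)"""
--
--     word = word.lower()
--
--     letters = {}
--     tup = ()
--
--     for letter in word:
--         if letter in letters:
--             tup += (letters[letter],)
--         else:
--             letternum = len(letters) + 1
--             tup += (letternum,)
--             letters[letter] = letternum
--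
--     return tup
-- ===== SOURCE B (Python) =====
-- def getpatterntuple(word):
--     """Takes a string and returns a tuple which retains only character
--     repetition info."""
--     w = word.lower()
--     return tuple(len(set(w[:w.index(c) + 1])) for c in w)
-- ===== Notes on version B (the rewrite author's own statement) =====
-- stated objective: alternative
-- what changed: B drops A's running dict-plus-tuple accumulator entirely and is stateless: each character's ordinal is computed independently as the number of distinct characters in the prefix of the lowercased word up to and including that character's first occurrence, len(set(w[:w.index(c)+1])).
import Mathlib
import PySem

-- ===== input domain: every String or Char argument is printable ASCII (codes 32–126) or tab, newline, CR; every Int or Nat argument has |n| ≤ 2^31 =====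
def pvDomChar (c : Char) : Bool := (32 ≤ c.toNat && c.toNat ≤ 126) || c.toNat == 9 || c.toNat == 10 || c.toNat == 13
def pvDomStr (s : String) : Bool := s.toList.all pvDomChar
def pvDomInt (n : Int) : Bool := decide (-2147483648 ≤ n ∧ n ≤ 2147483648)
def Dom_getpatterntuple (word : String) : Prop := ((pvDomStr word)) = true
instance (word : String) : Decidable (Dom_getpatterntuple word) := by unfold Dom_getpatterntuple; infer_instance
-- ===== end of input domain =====

-- B is an alternative algorithm: no dict and no running state — each character's ordinal is read off
-- directly as the number of distinct characters in the prefix ending at that character's first occurrence.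

-- ===== PORT A =====
-- A: one fused loop carrying the dict `letters` and the output tuple together.
def getpatterntuple (word : String) : List Int :=
  let w := (PySem.Str.lower word).toList
  (w.foldl
    (fun (st : PySem.Dict Char Int × List Int) letter =>
      if st.1.contains letter then
        (st.1, st.2 ++ [st.1.getD letter 0])   -- key present: getD's default is never used
      else
        let letternum : Int := (st.1.size : Int) + 1
        (st.1.insert letter letternum, st.2 ++ [letternum]))
    (PySem.Dict.empty, [])).2

-- ===== PORT B =====
-- B: tuple(len(set(w[:w.index(c) + 1])) for c in w) — stateless; w.index(c) never raises
-- since each c is drawn from w itself, so index?'s getD default 0 is never used: exact.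
def getpatterntuple_alt (word : String) : List Int :=
  let w := (PySem.Str.lower word).toList
  w.map (fun c =>
    let i : Nat := (PySem.List.index? w c).getD 0
    PySem.Set.len (PySem.Set.ofList (PySem.List.slice w none (some ((i : Int) + 1)))))

-- ===== PRECONDITION & SPEC =====
def Spec_getpatterntuple (word : String) (out : List Int) : Prop := out = getpatterntuple_alt word
instance (word : String) (out : List Int) : Decidable (Spec_getpatterntuple word out) := by unfold Spec_getpatterntuple; infer_instance

-- ===== CLAIM (what is proved, stated in full; the proofs are below) =====
def Claim_equal_getpatterntuple : Prop := ∀ (word : String), Dom_getpatterntuple word → Spec_getpatterntuple word (getpatterntuple word)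

-- ===== LEMMAS AND PROOFS =====

-- the common reference value: ordinal of c's first occurrence among the distinct letters of w
def pvOrd (w : List Char) (c : Char) : Int := (List.idxOf c (PySem.Set.ofList w) : Int) + 1

-- updating a set only appends
lemma set_update_prefix (l s : List Char) : s <+: PySem.Set.update s l := by
  induction l generalizing s with
  | nil => exact List.prefix_rfl
  | cons x t ih =>
      refine List.IsPrefix.trans ?_ (ih (PySem.Set.add s x))
      unfold PySem.Set.add
      split
      · exact List.prefix_rfl
      · exact List.prefix_append s [x]

lemma idxOf_update (l s : List Char) (c : Char) (hc : c ∈ s) :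
    List.idxOf c (PySem.Set.update s l) = List.idxOf c s := by
  obtain ⟨t, ht⟩ := set_update_prefix l s
  rw [← ht, List.idxOf_append_of_mem hc]

-- A's loop invariant, by induction over the remaining letters
lemma A_loop (l : List Char) (s : List Char) (d : PySem.Dict Char Int) (acc : List Int)
    (hn : s.Nodup)
    (hc : ∀ c, d.contains c = decide (c ∈ s))
    (hg : ∀ c ∈ s, d.getD c 0 = (List.idxOf c s : Int) + 1)
    (hs : d.size = s.length) :
    (l.foldl
      (fun (st : PySem.Dict Char Int × List Int) letter =>
        if st.1.contains letter then
          (st.1, st.2 ++ [st.1.getD letter 0])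
        else
          let letternum : Int := (st.1.size : Int) + 1
          (st.1.insert letter letternum, st.2 ++ [letternum]))
      (d, acc)).2
    = acc ++ l.map (fun c => (List.idxOf c (PySem.Set.update s l) : Int) + 1) := by
  induction l generalizing s d acc with
  | nil => simp [PySem.Set.update]
  | cons x t ih =>
      by_cases hx : x ∈ s
      · have hsetadd : PySem.Set.add s x = s := by
          unfold PySem.Set.add
          simp [PySem.Set.contains, hx]
        have hupd : PySem.Set.update s (x :: t) = PySem.Set.update s t := by
          simp [PySem.Set.update, hsetadd]
        simp only [List.foldl_cons, hc x, hx, decide_true, if_true]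
        rw [ih s d (acc ++ [d.getD x 0]) hn hc hg hs]
        rw [hupd, List.map_cons, hg x hx]
        simp [idxOf_update t s x hx]
      · have hsetadd : PySem.Set.add s x = s ++ [x] := by
          unfold PySem.Set.add
          simp [PySem.Set.contains, hx]
        have hupd : PySem.Set.update s (x :: t) = PySem.Set.update (s ++ [x]) t := by
          simp [PySem.Set.update, hsetadd]
        have hn' : (s ++ [x]).Nodup :=
          List.Nodup.append hn (List.nodup_singleton x)
            (by intro a ha hb
                rw [List.mem_singleton] at hb
                exact hx (hb ▸ ha))
        simp only [List.foldl_cons, hc x, hx, decide_false, Bool.false_eq_true, if_false]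
        rw [ih (s ++ [x]) _ _ hn'
          (by
            intro c
            rw [PySem.Dict.contains_insert, hc c]
            by_cases h : c = x
            · simp [h]
            · simp [h, List.mem_append])
          (by
            intro c hcmem
            rw [PySem.Dict.getD_insert]
            rcases List.mem_append.mp hcmem with h | h
            · have hne : c ≠ x := fun he => hx (he ▸ h)
              rw [if_neg hne, hg c h, List.idxOf_append_of_mem h]
            · have he : c = x := by simpa using h
              subst he
              rw [if_pos rfl, hs]
              have : List.idxOf c (s ++ [c]) = s.length := by
                rw [List.idxOf_append_of_notMem hx]
                simp
              rw [this])
          (by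
            rw [PySem.Dict.size_insert, hc x]
            simp [hx, hs])]
        rw [hupd, List.map_cons, hs]
        have : List.idxOf x (PySem.Set.update (s ++ [x]) t) = s.length := by
          rw [idxOf_update t (s ++ [x]) x (by simp), List.idxOf_append_of_notMem hx]
          simp
        simp [this]

-- A computes the reference value
lemma A_eq_ref (word : String) :
    getpatterntuple word
      = ((PySem.Str.lower word).toList).map (pvOrd ((PySem.Str.lower word).toList)) := by
  unfold getpatterntuple
  rw [A_loop _ [] PySem.Dict.empty [] (by simp)
      (by intro c; simp) (by intro c h; simp at h) (by simp)]
  simp only [List.nil_append]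
  apply List.map_congr_left
  intro c _
  unfold pvOrd
  rw [PySem.Set.ofList_eq_foldl]
  rfl

-- B's per-character value is the reference value
lemma B_value (w : List Char) (c : Char) (hc : c ∈ w) :
    PySem.Set.len (PySem.Set.ofList
        (PySem.List.slice w none (some ((((PySem.List.index? w c).getD 0 : Nat) : Int) + 1))))
      = pvOrd w c := by
  obtain ⟨k, hk⟩ := Option.isSome_iff_exists.mp ((PySem.List.index?_isSome_iff w c).mpr hc)
  obtain ⟨pre, suf, hw, hlen, hpre⟩ := (PySem.List.index?_eq_some_iff w c k).mp hk
  rw [hk]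
  simp only [Option.getD_some]
  have hcast : ((k : Int) + 1) = (((k + 1 : Nat)) : Int) := by push_cast; ring
  rw [hcast, PySem.List.slice_to_natCast]
  have htake : w.take (k + 1) = pre ++ [c] := by
    subst hw hlen
    rw [List.take_append]
    simp
  rw [htake]
  have hofl : PySem.Set.ofList (pre ++ [c]) = PySem.Set.ofList pre ++ [c] := by
    rw [PySem.Set.ofList_eq_foldl, List.foldl_append, ← PySem.Set.ofList_eq_foldl]
    show PySem.Set.add (PySem.Set.ofList pre) c = _
    unfold PySem.Set.add
    simp [PySem.Set.contains, PySem.Set.mem_ofList, hpre]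
  have hofw : PySem.Set.ofList w = PySem.Set.update (PySem.Set.ofList pre ++ [c]) suf := by
    have : w = (pre ++ [c]) ++ suf := by simp [hw]
    rw [this, PySem.Set.ofList_eq_foldl, List.foldl_append, ← PySem.Set.ofList_eq_foldl, hofl]
    rfl
  unfold pvOrd
  rw [hofw, idxOf_update suf _ c (by simp), List.idxOf_append_of_notMem
        (by simp [PySem.Set.mem_ofList, hpre])]
  rw [hofl]
  simp [PySem.Set.len]

-- B computes the reference value
lemma B_eq_ref (word : String) :
    getpatterntuple_alt word
      = ((PySem.Str.lower word).toList).map (pvOrd ((PySem.Str.lower word).toList)) := by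
  unfold getpatterntuple_alt
  apply List.map_congr_left
  intro c hc
  exact B_value _ c hc

-- ===== VERDICT (by name: the statement is the Claim_ definition above) =====
theorem getpatterntuple_spec : Claim_equal_getpatterntuple := by
  intro word _
  unfold Spec_getpatterntuple
  rw [A_eq_ref, B_eq_ref]
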